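-- pv_equiv track=rewrite | github.com/NKrvavica/Advent-of-Code-2020 | Day24/day24.py | turn_tiles
-- ===== SOURCE A (Python) =====
-- def turn_tiles(parsed_instruc):
--     floor = {}
--     for instructions in parsed_instruc:
--         x, y = 0, 0
--         for instruc in instructions:
--             x += MOVE[instruc][0]
--             y += MOVE[instruc][1]
--         if (x, y) in floor:
--             floor[(x, y)] = not floor[(x, y)]
--         else:
--             floor[(x, y)] = True
--     return floor
--
-- MOVE = {'e': (1, 0),
--         'se': (0, 1),
--         'sw': (-1, 1),
--         'w': (-1, 0),
--         'nw': (0, -1),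
--         'ne': (1, -1)}
-- ===== SOURCE B (Python) =====
-- MOVE = {'e': (1, 0),
--         'se': (0, 1),
--         'sw': (-1, 1),
--         'w': (-1, 0),
--         'nw': (0, -1),
--         'ne': (1, -1)}
--
--
-- def turn_tiles(parsed_instruc):
--     # Stage 1: the list of final positions, one per instruction sequence.
--     dests = [(sum(MOVE[i][0] for i in seq), sum(MOVE[i][1] for i in seq))
--              for seq in parsed_instruc]
--     # Stage 2: one comprehension, no accumulator: keep the first occurrence of
--     # each position (prefix-membership scan) and count its occurrences in the
--     # whole list; the tile is black iff that count is odd.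
--     return {p: dests.count(p) % 2 == 1
--             for k, p in enumerate(dests) if p not in dests[:k]}
-- ===== Notes on version B (the rewrite author's own statement) =====
-- stated objective: alternative
-- what changed: B drops A's mutable dict of running toggles entirely: it first materialises the list of all final positions, then builds the result in one pure comprehension that deduplicates by scanning the prefix for an earlier occurrence and decides each value by counting that position's occurrences in the whole list.
import Mathlib
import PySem

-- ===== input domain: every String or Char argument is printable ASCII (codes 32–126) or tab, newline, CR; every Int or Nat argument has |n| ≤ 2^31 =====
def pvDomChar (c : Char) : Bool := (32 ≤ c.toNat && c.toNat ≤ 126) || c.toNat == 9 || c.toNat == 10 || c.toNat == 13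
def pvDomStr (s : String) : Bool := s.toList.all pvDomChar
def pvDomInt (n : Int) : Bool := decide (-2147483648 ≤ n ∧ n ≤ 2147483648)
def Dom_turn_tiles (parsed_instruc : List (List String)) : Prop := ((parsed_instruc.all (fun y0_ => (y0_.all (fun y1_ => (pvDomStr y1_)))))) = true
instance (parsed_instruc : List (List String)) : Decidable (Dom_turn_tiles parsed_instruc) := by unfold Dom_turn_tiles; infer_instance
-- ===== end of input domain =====

-- B replaces A's mutable dict of running toggles by a staged, accumulator-free computation:
-- the list of final positions, then a pure comprehension deduplicating by prefix scan and
-- counting occurrences in the whole list; equivalence is about the returned dict (ordered association list).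

-- module-level constant MOVE, shared by both Pythons
def MOVE : PySem.Dict String (Int × Int) :=
  PySem.Dict.ofList [("e", (1, 0)), ("se", (0, 1)), ("sw", (-1, 1)),
                     ("w", (-1, 0)), ("nw", (0, -1)), ("ne", (1, -1))]

-- ===== PORT A =====
-- MOVE[instruc] raises KeyError on unknown keys; Pre_turn_tiles excludes those inputs, so the
-- `.getD (0, 0)` default is never reached on admitted inputs.
def turn_tiles (parsed_instruc : List (List String)) : List (Int × Int × Bool) :=
  let floor := parsed_instruc.foldl (fun floor instructions =>
    let xy := instructions.foldl
      (fun (xy : Int × Int) instruc =>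
        (xy.1 + ((MOVE.get? instruc).getD (0, 0)).1,
         xy.2 + ((MOVE.get? instruc).getD (0, 0)).2)) (0, 0)
    if floor.contains xy then floor.insert xy (!(floor.getD xy false))
    else floor.insert xy true) PySem.Dict.empty
  floor.items.map (fun kv => (kv.1.1, kv.1.2, kv.2))

-- ===== PORT B =====
def turn_tiles_alt (parsed_instruc : List (List String)) : List (Int × Int × Bool) :=
  let dests : List (Int × Int) := parsed_instruc.map (fun seq =>
    ((seq.map (fun i => ((MOVE.get? i).getD (0, 0)).1)).sum,
     (seq.map (fun i => ((MOVE.get? i).getD (0, 0)).2)).sum))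
  ((PySem.List.enumerate dests 0).filter
      (fun kp => !((PySem.List.slice dests none (some kp.1)).contains kp.2))).map
    (fun kp => (kp.2.1, kp.2.2, PySem.Int.mod ((dests.count kp.2 : Int)) 2 == 1))

-- ===== PRECONDITION & SPEC =====
-- Pre_ excludes exactly the inputs on which A raises KeyError: an instruction not among MOVE's keys.
def Pre_turn_tiles (parsed_instruc : List (List String)) : Prop :=
  ∀ l ∈ parsed_instruc, ∀ s ∈ l, s ∈ ["e", "se", "sw", "w", "nw", "ne"]
instance (parsed_instruc : List (List String)) : Decidable (Pre_turn_tiles parsed_instruc) := by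
  unfold Pre_turn_tiles; infer_instance

def pvWitness_turn_tiles : List (List String) := [["e", "se"], ["e", "se"], ["w", "w", "ne"], []]

def Spec_turn_tiles (parsed_instruc : List (List String)) (out : List (Int × Int × Bool)) : Prop := out = turn_tiles_alt parsed_instruc
instance (parsed_instruc : List (List String)) (out : List (Int × Int × Bool)) : Decidable (Spec_turn_tiles parsed_instruc out) := by unfold Spec_turn_tiles; infer_instance

-- ===== CLAIM (what is proved, stated in full; the proofs are below) =====
def Claim_equal_turn_tiles : Prop := ∀ (parsed_instruc : List (List String)), Dom_turn_tiles parsed_instruc → Pre_turn_tiles parsed_instruc → Spec_turn_tiles parsed_instruc (turn_tiles parsed_instruc)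

-- ===== LEMMAS AND PROOFS =====

-- value inserted by A's toggle step
def toggleVal (d : PySem.Dict (Int × Int) Bool) (xy : Int × Int) : Bool :=
  if d.contains xy then !(d.getD xy false) else true

lemma toggleVal_eq_not_getD (d : PySem.Dict (Int × Int) Bool) (xy : Int × Int) :
    toggleVal d xy = !(d.getD xy false) := by
  unfold toggleVal
  by_cases h : d.contains xy = true
  · simp [h]
  · simp only [Bool.not_eq_true] at h
    simp [h, PySem.Dict.getD_of_not_contains d false h]

lemma toggle_step_eq (d : PySem.Dict (Int × Int) Bool) (xy : Int × Int) :
    (if d.contains xy then d.insert xy (!(d.getD xy false)) else d.insert xy true)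
      = d.insert xy (toggleVal d xy) := by
  unfold toggleVal; split <;> rfl

lemma parity_succ (n : ℕ) : (((n + 1) % 2 : ℕ) == 1) = !((n % 2 : ℕ) == 1) := by
  rcases Nat.mod_two_eq_zero_or_one n with h | h <;> simp [Nat.add_mod, h]

lemma getD_toggle_fold (ps : List (Int × Int)) (k : Int × Int) :
    ∀ d : PySem.Dict (Int × Int) Bool,
      (ps.foldl (fun d xy => d.insert xy (toggleVal d xy)) d).getD k false
        = xor (d.getD k false) ((ps.count k % 2 : ℕ) == 1) := by
  induction ps with
  | nil => intro d; simp
  | cons p ps ih =>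
    intro d
    simp only [List.foldl_cons, ih]
    by_cases hk : k = p
    · subst hk
      rw [toggleVal_eq_not_getD, PySem.Dict.getD_insert_self]
      rw [List.count_cons_self, parity_succ]
      cases d.getD k false <;> cases ((ps.count k % 2 : ℕ) == 1) <;> rfl
    · rw [PySem.Dict.getD_insert_of_ne _ _ _ hk]
      simp [Ne.symm hk]

-- A's inner walk equals B's pair of component sums.
lemma walk_eq_sum (l : List String) :
    ∀ a : Int × Int,
      l.foldl (fun (xy : Int × Int) instruc =>
        (xy.1 + ((MOVE.get? instruc).getD (0, 0)).1,
         xy.2 + ((MOVE.get? instruc).getD (0, 0)).2)) a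
      = (a.1 + (l.map (fun i => ((MOVE.get? i).getD (0, 0)).1)).sum,
         a.2 + (l.map (fun i => ((MOVE.get? i).getD (0, 0)).2)).sum) := by
  induction l with
  | nil => intro a; simp
  | cons x xs ih =>
    intro a
    simp only [List.foldl_cons, List.map_cons, List.sum_cons, ih]
    simp only [Prod.mk.injEq]
    constructor <;> ring

lemma int_mod_two_of_natCast (n : ℕ) :
    (PySem.Int.mod (n : Int) 2 == 1) = ((n % 2 : ℕ) == 1) := by
  rw [PySem.Int.mod_eq_emod_of_pos (by omega : (0:Int) < 2)]
  have hc : ((n : Int) % 2) = ((n % 2 : ℕ) : Int) := (Int.natCast_mod n 2).symm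
  rcases Nat.mod_two_eq_zero_or_one n with h | h <;> simp [hc, h]

-- the common list of final positions
def dests (parsed_instruc : List (List String)) : List (Int × Int) :=
  parsed_instruc.map (fun l =>
    ((l.map (fun i => ((MOVE.get? i).getD (0, 0)).1)).sum,
     (l.map (fun i => ((MOVE.get? i).getD (0, 0)).2)).sum))

lemma turn_tiles_eq (parsed_instruc : List (List String)) :
    turn_tiles parsed_instruc
      = ((PySem.Set.ofList (dests parsed_instruc)).map
          (fun k => (k.1, k.2, ((dests parsed_instruc).count k % 2 : ℕ) == 1))) := by
  unfold turn_tiles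
  have hstep : parsed_instruc.foldl (fun floor instructions =>
      let xy := instructions.foldl
        (fun (xy : Int × Int) instruc =>
          (xy.1 + ((MOVE.get? instruc).getD (0, 0)).1,
           xy.2 + ((MOVE.get? instruc).getD (0, 0)).2)) (0, 0)
      if floor.contains xy then floor.insert xy (!(floor.getD xy false))
      else floor.insert xy true) PySem.Dict.empty
      = (dests parsed_instruc).foldl (fun d xy => d.insert xy (toggleVal d xy))
          PySem.Dict.empty := by
    unfold dests
    rw [List.foldl_map]
    refine PySem.List.foldl_congr_mem _ _ _ _ (fun d l _ => ?_)
    rw [walk_eq_sum l (0, 0)]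
    simp only [zero_add]
    exact toggle_step_eq d _
  simp only [hstep]
  set ps := dests parsed_instruc with hps
  have hnd : ((ps.foldl (fun d xy => d.insert xy (toggleVal d xy))
      PySem.Dict.empty).keys).Nodup :=
    PySem.Dict.nodup_keys_foldl_insert _ _ _ (by simp)
  rw [PySem.Dict.items_eq_map_keys _ hnd false]
  rw [PySem.Dict.keys_foldl_insert]
  simp only [PySem.Dict.keys_empty, PySem.Set.update_nil_left]
  rw [List.map_map]
  refine List.map_congr_left (fun k _ => ?_)
  simp only [Function.comp]
  rw [getD_toggle_fold]
  simp

-- B's dedup-by-prefix-scan keeps exactly the first occurrences, in order.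
lemma filter_enumerate_firsts (ds : List (Int × Int)) :
    ((PySem.List.enumerate ds 0).filter
        (fun kp => !((PySem.List.slice ds none (some kp.1)).contains kp.2))).map
      (fun kp => kp.2) = PySem.Set.ofList ds := by
  induction ds using List.reverseRecOn with
  | nil => rfl
  | append_singleton xs x ih =>
    rw [PySem.List.enumerate_append]
    rw [List.filter_append, List.map_append]
    have h1 : (PySem.List.enumerate xs 0).filter
        (fun kp => !((PySem.List.slice (xs ++ [x]) none (some kp.1)).contains kp.2))
        = (PySem.List.enumerate xs 0).filter
        (fun kp => !((PySem.List.slice xs none (some kp.1)).contains kp.2)) := by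
      refine List.filter_congr (fun kp hkp => ?_)
      rcases (PySem.List.mem_enumerate_iff _ _ _).1 hkp with ⟨k, hk, rfl⟩
      simp only [zero_add]
      rw [PySem.List.slice_to_natCast, PySem.List.slice_to_natCast,
        List.take_append_of_le_length (le_of_lt hk)]
    rw [h1, ih, PySem.Set.ofList_append_singleton]
    have h2 : PySem.List.enumerate [x] (0 + (xs.length : Int)) = [((xs.length : Int), x)] := by
      simp [PySem.List.enumerate_cons, PySem.List.enumerate_nil]
    rw [h2]
    have h3 : PySem.List.slice (xs ++ [x]) none (some ((xs.length : Int)))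
        = xs := by
      rw [PySem.List.slice_to_natCast]
      simp
    by_cases hx : x ∈ xs
    · have : (xs ++ [x]).contains x = true := by simp [hx]
      simp [List.filter, h3, PySem.Set.add, PySem.Set.contains, PySem.Set.mem_ofList, hx]
    · simp [List.filter, h3, PySem.Set.add, PySem.Set.contains, PySem.Set.mem_ofList, hx]

lemma turn_tiles_alt_eq (parsed_instruc : List (List String)) :
    turn_tiles_alt parsed_instruc
      = ((PySem.Set.ofList (dests parsed_instruc)).map
          (fun k => (k.1, k.2, PySem.Int.mod ((dests parsed_instruc).count k : Int) 2 == 1))) := by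
  unfold turn_tiles_alt
  have hd : (parsed_instruc.map (fun seq =>
      ((seq.map (fun i => ((MOVE.get? i).getD (0, 0)).1)).sum,
       (seq.map (fun i => ((MOVE.get? i).getD (0, 0)).2)).sum))) = dests parsed_instruc := rfl
  simp only [hd]
  rw [show (fun (kp : Int × Int × Int) => (kp.2.1, kp.2.2,
        PySem.Int.mod (((dests parsed_instruc).count kp.2 : Int)) 2 == 1))
      = (fun k : Int × Int => (k.1, k.2,
        PySem.Int.mod (((dests parsed_instruc).count k : Int)) 2 == 1)) ∘ (fun kp => kp.2) from rfl]
  rw [← List.map_map, filter_enumerate_firsts]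

-- ===== VERDICT (by name: the statement is the Claim_ definition above) =====
theorem turn_tiles_spec : Claim_equal_turn_tiles := by
  intro parsed_instruc _ _
  unfold Spec_turn_tiles
  rw [turn_tiles_eq, turn_tiles_alt_eq]
  exact List.map_congr_left (fun k _ => by rw [int_mod_two_of_natCast])
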